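-- pv_equiv track=rewrite | github.com/MakinFantasy/xo | 25/10.06/6.py | f
-- ===== SOURCE A (Python) =====
-- def f(n):
--     d = 2
--     mas = []
--     while d * d < n:
--         if n % d == 0:
--             mas.append(d)
--             mas.append(n // d)
--         d += 1
--     if d * d == n:
--         mas.append(d)
--     mas.sort()
--     if len(mas) < 5:
--         return 0
--     else:
--         m = mas[0] * mas[1] * mas[2] * mas[3] * mas[4]
--         return m
-- ===== SOURCE B (Python) =====
-- def f(n):
--     small = []
--     large = []
--     d = 2
--     while d * d < n:
--         if n % d == 0:
--             small.append(d)
--             if len(small) == 5: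
--                 return small[0] * small[1] * small[2] * small[3] * small[4]
--             large.append(n // d)
--         d += 1
--     if d * d == n:
--         small.append(d)
--     mas = small + large[::-1]
--     if len(mas) < 5:
--         return 0
--     return mas[0] * mas[1] * mas[2] * mas[3] * mas[4]
-- ===== Notes on version B (the rewrite author's own statement) =====
-- stated objective: alternative
-- what changed: B keeps two already-ordered accumulators (ascending small divisors and their descending cofactors, reversed once at the end) instead of appending unordered pairs and sorting, and returns early with the product as soon as five small divisors have been found.
import Mathlib
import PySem

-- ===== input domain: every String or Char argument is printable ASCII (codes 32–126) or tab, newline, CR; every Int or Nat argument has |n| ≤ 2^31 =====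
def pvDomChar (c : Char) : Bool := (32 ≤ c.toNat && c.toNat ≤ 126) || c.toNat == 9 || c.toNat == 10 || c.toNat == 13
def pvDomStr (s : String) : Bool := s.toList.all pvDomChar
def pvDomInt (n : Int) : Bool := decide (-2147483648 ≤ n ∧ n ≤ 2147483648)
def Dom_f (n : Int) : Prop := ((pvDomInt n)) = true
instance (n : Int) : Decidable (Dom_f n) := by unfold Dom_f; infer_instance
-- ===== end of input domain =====

-- B replaces A's collect-pairs-then-sort by two already-ordered accumulators (ascending small
-- divisors, their cofactors reversed at the end) with an early return once five small divisors
-- exist; objective: alternative (no sort, possible early exit).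

-- termination helper used by every loop below: while the guard d*d < n holds, d < n
theorem pv_step_lt {n d : Int} (h : d * d < n) : (n - (d + 1)).toNat < (n - d).toNat := by
  have h0 : 0 ≤ d * d := mul_self_nonneg d
  have h1 : 2 * d ≤ d * d + 1 := by nlinarith [mul_self_nonneg (d - 1)]
  omega

-- mas[0] * mas[1] * mas[2] * mas[3] * mas[4]; indices are in range wherever either Python
-- evaluates this expression (the guarding branch ensures length ≥ 5), so getD 0 is exact.
def prod5 (mas : List Int) : Int :=
  ((PySem.List.pyGet? mas 0).getD 0) * ((PySem.List.pyGet? mas 1).getD 0) *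
  ((PySem.List.pyGet? mas 2).getD 0) * ((PySem.List.pyGet? mas 3).getD 0) *
  ((PySem.List.pyGet? mas 4).getD 0)

-- ===== PORT A =====
-- the while loop: state (d, mas), returns both on exit
def fLoop (n d : Int) (mas : List Int) : Int × List Int :=
  if h : d * d < n then
    fLoop n (d + 1)
      (if PySem.Int.mod n d == 0 then mas ++ [d, PySem.Int.floordiv n d] else mas)
  else (d, mas)
termination_by (n - d).toNat
decreasing_by exact pv_step_lt h

def f (n : Int) : Int :=
  let p := fLoop n 2 []
  let mas := if p.1 * p.1 == n then p.2 ++ [p.1] else p.2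
  let mas := PySem.List.sorted mas (fun x => x) false
  if (mas.length : Int) < 5 then 0 else prod5 mas

-- ===== PORT B =====
-- the while loop of Source B: early product (.inl) or final state (d, small, large) (.inr)
def fAltLoop (n d : Int) (small large : List Int) : Int ⊕ (Int × List Int × List Int) :=
  if h : d * d < n then
    if PySem.Int.mod n d == 0 then
      let small' := small ++ [d]
      if (small'.length : Int) == 5 then .inl (prod5 small')
      else fAltLoop n (d + 1) small' (large ++ [PySem.Int.floordiv n d])
    else fAltLoop n (d + 1) small large
  else .inr (d, small, large)
termination_by (n - d).toNat
decreasing_by all_goals exact pv_step_lt h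

def f_alt (n : Int) : Int :=
  match fAltLoop n 2 [] [] with
  | .inl m => m
  | .inr (d, small, large) =>
    let small := if d * d == n then small ++ [d] else small
    -- large[::-1] is List.reverse (PySem.List.slice?_none_none_neg_one)
    let mas := small ++ large.reverse
    if (mas.length : Int) < 5 then 0 else prod5 mas

-- ===== PRECONDITION & SPEC =====
def Spec_f (n : Int) (out : Int) : Prop := out = f_alt n
instance (n : Int) (out : Int) : Decidable (Spec_f n out) := by unfold Spec_f; infer_instance

-- ===== CLAIM (what is proved, stated in full; the proofs are below) =====
def Claim_equal_f : Prop := ∀ (n : Int), Dom_f n → Spec_f n (f n)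

-- ===== LEMMAS AND PROOFS =====

-- specification-side recursions (proof only, not used by the ports)
def dfin (n d : Int) : Int :=
  if h : d * d < n then dfin n (d + 1) else d
termination_by (n - d).toNat
decreasing_by exact pv_step_lt h

def smalls (n d : Int) : List Int :=
  if h : d * d < n then
    (if PySem.Int.mod n d == 0 then d :: smalls n (d + 1) else smalls n (d + 1))
  else []
termination_by (n - d).toNat
decreasing_by all_goals exact pv_step_lt h

def larges (n d : Int) : List Int :=
  if h : d * d < n then
    (if PySem.Int.mod n d == 0 then PySem.Int.floordiv n d :: larges n (d + 1)
     else larges n (d + 1))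
  else []
termination_by (n - d).toNat
decreasing_by all_goals exact pv_step_lt h

def interA (n d : Int) : List Int :=
  if h : d * d < n then
    (if PySem.Int.mod n d == 0 then d :: PySem.Int.floordiv n d :: interA n (d + 1)
     else interA n (d + 1))
  else []
termination_by (n - d).toNat
decreasing_by all_goals exact pv_step_lt h



-- one-step unfolding lemmas for the specification recursions
theorem smalls_step_div {n d : Int} (h : d * d < n) (hm : (PySem.Int.mod n d == 0) = true) :
    smalls n d = d :: smalls n (d + 1) := by rw [smalls.eq_def]; simp [h, hm]

theorem smalls_step_nodiv {n d : Int} (h : d * d < n) (hm : ¬ (PySem.Int.mod n d == 0) = true) :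
    smalls n d = smalls n (d + 1) := by rw [smalls.eq_def]; simp [h, hm]

theorem smalls_stop {n d : Int} (h : ¬ d * d < n) : smalls n d = [] := by
  rw [smalls.eq_def]; simp [h]

theorem larges_step_div {n d : Int} (h : d * d < n) (hm : (PySem.Int.mod n d == 0) = true) :
    larges n d = PySem.Int.floordiv n d :: larges n (d + 1) := by rw [larges.eq_def]; simp [h, hm]

theorem larges_step_nodiv {n d : Int} (h : d * d < n) (hm : ¬ (PySem.Int.mod n d == 0) = true) :
    larges n d = larges n (d + 1) := by rw [larges.eq_def]; simp [h, hm]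

theorem larges_stop {n d : Int} (h : ¬ d * d < n) : larges n d = [] := by
  rw [larges.eq_def]; simp [h]

theorem dfin_step {n d : Int} (h : d * d < n) : dfin n d = dfin n (d + 1) := by
  rw [dfin.eq_def]; simp [h]

theorem dfin_stop {n d : Int} (h : ¬ d * d < n) : dfin n d = d := by
  rw [dfin.eq_def]; simp [h]

theorem fLoop_spec (n d : Int) (mas : List Int) :
    fLoop n d mas = (dfin n d, mas ++ interA n d) := by
  rw [fLoop.eq_def, interA.eq_def]
  split_ifs with h hm
  · rw [fLoop_spec n (d + 1), dfin_step h]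
    simp
  · rw [fLoop_spec n (d + 1), dfin_step h]
  · rw [dfin_stop h]; simp
termination_by (n - d).toNat
decreasing_by all_goals exact pv_step_lt h

theorem interA_perm (n d : Int) : (interA n d).Perm (smalls n d ++ larges n d) := by
  rw [interA.eq_def]
  split_ifs with h hm
  · rw [smalls_step_div h hm, larges_step_div h hm]
    refine .trans (.cons _ (.cons _ (interA_perm n (d + 1)))) ?_
    exact .cons _ (List.perm_middle.symm)
  · rw [smalls_step_nodiv h hm, larges_step_nodiv h hm]
    exact interA_perm n (d + 1)
  · rw [smalls_stop h, larges_stop h]; simp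
termination_by (n - d).toNat
decreasing_by all_goals exact pv_step_lt h

theorem mem_smalls (n d : Int) {x : Int} (hx : x ∈ smalls n d) :
    d ≤ x ∧ x * x < n ∧ PySem.Int.mod n x = 0 := by
  rw [smalls.eq_def] at hx
  split_ifs at hx with h hm
  · rcases List.mem_cons.1 hx with rfl | hx'
    · exact ⟨le_refl _, h, by simpa using hm⟩
    · have h' := mem_smalls n (d + 1) hx'
      exact ⟨by omega, h'.2⟩
  · have h' := mem_smalls n (d + 1) hx
    exact ⟨by omega, h'.2⟩
  · simp at hx
termination_by (n - d).toNat
decreasing_by all_goals exact pv_step_lt h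

theorem mem_larges (n d : Int) {y : Int} (hy : y ∈ larges n d) :
    ∃ e, d ≤ e ∧ e * e < n ∧ PySem.Int.mod n e = 0 ∧ y = PySem.Int.floordiv n e := by
  rw [larges.eq_def] at hy
  split_ifs at hy with h hm
  · rcases List.mem_cons.1 hy with rfl | hy'
    · exact ⟨d, le_refl _, h, by simpa using hm, rfl⟩
    · obtain ⟨e, he1, he2, he3, he4⟩ := mem_larges n (d + 1) hy'
      exact ⟨e, by omega, he2, he3, he4⟩
  · obtain ⟨e, he1, he2, he3, he4⟩ := mem_larges n (d + 1) hy
    exact ⟨e, by omega, he2, he3, he4⟩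
  · simp at hy
termination_by (n - d).toNat
decreasing_by all_goals exact pv_step_lt h

theorem smalls_pairwise (n d : Int) : (smalls n d).Pairwise (· < ·) := by
  rw [smalls.eq_def]
  split_ifs with h hm
  · refine List.Pairwise.cons (fun x hx => ?_) (smalls_pairwise n (d + 1))
    have := (mem_smalls n (d + 1) hx).1
    omega
  · exact smalls_pairwise n (d + 1)
  · exact List.Pairwise.nil
termination_by (n - d).toNat
decreasing_by all_goals exact pv_step_lt h

-- a divisor e with e*e < n has a cofactor n//e with n < (n//e)^2, and everything positive
theorem cofactor_facts {n e : Int} (he2 : 2 ≤ e) (hlt : e * e < n)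
    (hm : PySem.Int.mod n e = 0) :
    0 < PySem.Int.floordiv n e ∧ n < PySem.Int.floordiv n e * PySem.Int.floordiv n e ∧
      PySem.Int.floordiv n e * e = n := by
  have hn : 0 < n := by nlinarith
  have heq : PySem.Int.floordiv n e * e + PySem.Int.mod n e = n := PySem.Int.floordiv_mul_add_mod n e
  rw [hm, add_zero] at heq
  have hy : 0 < PySem.Int.floordiv n e := by nlinarith
  refine ⟨hy, ?_, heq⟩
  nlinarith

theorem larges_pairwise (n d : Int) (hd : 2 ≤ d) : (larges n d).Pairwise (· > ·) := by
  rw [larges.eq_def]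
  split_ifs with h hm
  · refine List.Pairwise.cons (fun y hy => ?_) (larges_pairwise n (d + 1) (by omega))
    obtain ⟨e, he1, he2, he3, he4⟩ := mem_larges n (d + 1) hy
    have hmd : PySem.Int.mod n d = 0 := by simpa using hm
    obtain ⟨hx1, _, hx3⟩ := cofactor_facts hd h hmd
    obtain ⟨hy1, _, hy3⟩ := cofactor_facts (by omega : (2:Int) ≤ e) he2 he3
    rw [he4]
    nlinarith
  · exact larges_pairwise n (d + 1) (by omega)
  · exact List.Pairwise.nil
termination_by (n - d).toNat
decreasing_by all_goals exact pv_step_lt h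

theorem dfin_ge (n d : Int) : d ≤ dfin n d := by
  rw [dfin.eq_def]
  split_ifs with h
  · have := dfin_ge n (d + 1); omega
  · exact le_refl _
termination_by (n - d).toNat
decreasing_by all_goals exact pv_step_lt h

-- the square tail appended after the loop
def sqpart (n : Int) : List Int := if dfin n 2 * dfin n 2 == n then [dfin n 2] else []

theorem sorted_inter (n : Int) :
    PySem.List.sorted (interA n 2 ++ sqpart n) (fun x => x) false =
      (smalls n 2 ++ sqpart n) ++ (larges n 2).reverse := by
  apply PySem.List.sorted_eq_of_perm_of_pairwise_lt
  · -- permutation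
    have h1 : (sqpart n ++ (larges n 2).reverse).Perm (larges n 2 ++ sqpart n) :=
      (((List.reverse_perm (larges n 2)).append_left (sqpart n)).trans List.perm_append_comm)
    have h2 : ((smalls n 2 ++ sqpart n) ++ (larges n 2).reverse).Perm
        ((smalls n 2 ++ larges n 2) ++ sqpart n) := by
      rw [List.append_assoc, List.append_assoc]
      exact h1.append_left (smalls n 2)
    exact h2.trans ((interA_perm n 2).symm.append_right (sqpart n))
  · -- strictly increasing
    have hsm : ∀ x ∈ smalls n 2 ++ sqpart n, 0 < x ∧ x * x ≤ n := by
      intro x hx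
      rcases List.mem_append.1 hx with hx | hx
      · obtain ⟨h1, h2, _⟩ := mem_smalls n 2 hx
        exact ⟨by omega, le_of_lt h2⟩
      · have hq2 : (2:Int) ≤ dfin n 2 := dfin_ge n 2
        unfold sqpart at hx
        split_ifs at hx with hsq
        · rcases List.mem_singleton.1 hx with rfl
          exact ⟨by omega, le_of_eq (beq_iff_eq.1 hsq)⟩
        · simp at hx
    have hlg : ∀ y ∈ (larges n 2).reverse, 0 < y ∧ n < y * y := by
      intro y hy
      obtain ⟨e, he1, he2, he3, he4⟩ := mem_larges n 2 (List.mem_reverse.1 hy)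
      obtain ⟨hy1, hy2, _⟩ := cofactor_facts he1 he2 he3
      exact ⟨by rw [he4]; exact hy1, by rw [he4]; exact hy2⟩
    refine List.pairwise_append.2 ⟨?_, ?_, ?_⟩
    · refine List.pairwise_append.2 ⟨smalls_pairwise n 2, ?_, ?_⟩
      · unfold sqpart; split_ifs <;> simp
      · intro x hx q hq
        obtain ⟨_, h2, _⟩ := mem_smalls n 2 hx
        unfold sqpart at hq
        split_ifs at hq with hsq
        · rcases List.mem_singleton.1 hq with rfl
          have hqq := beq_iff_eq.1 hsq
          have hx2 := (mem_smalls n 2 hx).1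
          have hq2 : (2:Int) ≤ dfin n 2 := dfin_ge n 2
          nlinarith
        · simp at hq
    · exact List.pairwise_reverse.2 (larges_pairwise n 2 (le_refl _))
    · intro x hx y hy
      obtain ⟨hx0, hx1⟩ := hsm x hx
      obtain ⟨hy0, hy1⟩ := hlg y hy
      nlinarith

theorem prod5_prefix {l t : List Int} (hl : 5 ≤ l.length) : prod5 (l ++ t) = prod5 l := by
  have hget : ∀ i : Int, 0 ≤ i → i < 5 →
      PySem.List.pyGet? (l ++ t) i = PySem.List.pyGet? l i := by
    intro i h0 h5
    rw [PySem.List.pyGet?_of_nonneg (l ++ t) h0, PySem.List.pyGet?_of_nonneg l h0,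
        List.getElem?_append_left (by omega : i.toNat < l.length)]
  unfold prod5
  rw [hget 0 (by norm_num) (by norm_num), hget 1 (by norm_num) (by norm_num),
      hget 2 (by norm_num) (by norm_num), hget 3 (by norm_num) (by norm_num),
      hget 4 (by norm_num) (by norm_num)]

theorem fAltLoop_spec (n d : Int) (small large : List Int)
    (hlen : small.length + (smalls n d).length < 5) :
    fAltLoop n d small large = .inr (dfin n d, small ++ smalls n d, large ++ larges n d) := by
  by_cases h : d * d < n
  · by_cases hm : (PySem.Int.mod n d == 0) = true
    · rw [smalls_step_div h hm] at hlen ⊢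
      rw [larges_step_div h hm, dfin_step h]
      rw [fAltLoop.eq_def]
      simp only [List.length_cons] at hlen
      have hne : ¬ (((small ++ [d]).length : Int) == 5) = true := by
        simp only [List.length_append, List.length_cons, List.length_nil, beq_iff_eq]
        push_cast
        omega
      simp only [dif_pos h, hm, if_true, hne]
      rw [fAltLoop_spec n (d + 1) (small ++ [d]) (large ++ [PySem.Int.floordiv n d])
          (by simp only [List.length_append, List.length_cons, List.length_nil]; omega)]
      simp
    · rw [smalls_step_nodiv h hm] at hlen ⊢
      rw [larges_step_nodiv h hm, dfin_step h]
      rw [fAltLoop.eq_def]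
      simp only [dif_pos h, hm]
      exact fAltLoop_spec n (d + 1) small large hlen
  · rw [smalls_stop h, larges_stop h, dfin_stop h, fAltLoop.eq_def]
    simp [h]
termination_by (n - d).toNat
decreasing_by all_goals exact pv_step_lt h

theorem fAltLoop_early (n d : Int) (small large : List Int)
    (h4 : small.length < 5) (h5 : 5 ≤ small.length + (smalls n d).length) :
    fAltLoop n d small large = .inl (prod5 (small ++ smalls n d)) := by
  by_cases h : d * d < n
  · by_cases hm : (PySem.Int.mod n d == 0) = true
    · rw [smalls_step_div h hm] at h5 ⊢
      rw [fAltLoop.eq_def]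
      simp only [List.length_cons] at h5
      by_cases h55 : (small ++ [d]).length = 5
      · have hyes : (((small ++ [d]).length : Int) == 5) = true := by
          simp [h55]
        simp only [dif_pos h, hm, if_true, hyes]
        have hp : prod5 (small ++ d :: smalls n (d + 1)) = prod5 (small ++ [d]) := by
          rw [show small ++ d :: smalls n (d + 1) = (small ++ [d]) ++ smalls n (d + 1) by simp]
          exact prod5_prefix (by omega)
        rw [hp]
      · have hne : ¬ (((small ++ [d]).length : Int) == 5) = true := by
          simp only [beq_iff_eq]
          exact_mod_cast fun hc => h55 (by exact_mod_cast hc)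
        simp only [dif_pos h, hm, if_true, hne]
        have h55' : (small ++ [d]).length < 5 := by
          simp only [List.length_append, List.length_cons, List.length_nil] at h55 ⊢
          omega
        rw [fAltLoop_early n (d + 1) (small ++ [d]) (large ++ [PySem.Int.floordiv n d]) h55'
            (by simp only [List.length_append, List.length_cons, List.length_nil]; omega)]
        simp
    · rw [smalls_step_nodiv h hm] at h5 ⊢
      rw [fAltLoop.eq_def]
      simp only [dif_pos h, hm]
      exact fAltLoop_early n (d + 1) small large h4 h5
  · rw [smalls_stop h] at h5
    simp only [List.length_nil] at h5
    omega
termination_by (n - d).toNat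
decreasing_by all_goals exact pv_step_lt h

theorem f_spec_aux (n : Int) : f n = f_alt n := by
  have hA : f n =
      (if (((smalls n 2 ++ sqpart n) ++ (larges n 2).reverse).length : Int) < 5 then 0
       else prod5 ((smalls n 2 ++ sqpart n) ++ (larges n 2).reverse)) := by
    unfold f
    rw [fLoop_spec n 2 []]
    simp only [List.nil_append]
    rw [show (if ((dfin n 2) * (dfin n 2) == n) then interA n 2 ++ [dfin n 2] else interA n 2)
          = interA n 2 ++ sqpart n by unfold sqpart; split_ifs <;> simp]
    rw [sorted_inter n]
  by_cases h5 : 5 ≤ (smalls n 2).length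
  · rw [hA]
    have hlenT : 5 ≤ ((smalls n 2 ++ sqpart n) ++ (larges n 2).reverse).length := by
      simp only [List.length_append]
      omega
    rw [if_neg (by omega)]
    rw [List.append_assoc, prod5_prefix h5]
    unfold f_alt
    rw [fAltLoop_early n 2 [] [] (by simp) (by simpa using h5)]
    simp
  · unfold f_alt
    rw [fAltLoop_spec n 2 [] [] (by simpa using (by omega : (smalls n 2).length < 5))]
    simp only [List.nil_append]
    rw [hA]
    rw [show (if ((dfin n 2) * (dfin n 2) == n) then smalls n 2 ++ [dfin n 2] else smalls n 2)
          = smalls n 2 ++ sqpart n by unfold sqpart; split_ifs <;> simp]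

-- ===== VERDICT (by name: the statement is the Claim_ definition above) =====
theorem f_spec : Claim_equal_f := by
  intro n _
  unfold Spec_f
  exact f_spec_aux n
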